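-- pv_equiv track=rewrite | github.com/jadenfix/1115_hack | 1115/app/clients/browser_use.py | choose_urls
-- ===== SOURCE A (Python) =====
-- from typing import Dict, List
--
-- def choose_urls(linkup_urls: List[str], preferred_paths: List[str], max_urls: int) -> List[str]:
--     chosen: List[str] = []
--     for candidate in linkup_urls:
--         if len(chosen) >= max_urls:
--             break
--         if any(path in candidate for path in preferred_paths):
--             chosen.append(candidate)
--     for candidate in linkup_urls:
--         if len(chosen) >= max_urls:
--             break
--         if candidate not in chosen:
--             chosen.append(candidate)
--     return chosen
-- ===== SOURCE B (Python) =====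
-- def choose_urls(linkup_urls, preferred_paths, max_urls):
--     preferred = []
--     others = []
--     seen = set()
--     for candidate in linkup_urls:
--         if len(preferred) >= max_urls:
--             break  # preferred alone fills the cap; nothing later can matter
--         if any(path in candidate for path in preferred_paths):
--             preferred.append(candidate)
--         elif candidate not in seen:
--             seen.add(candidate)
--             others.append(candidate)
--     result = preferred[:max(max_urls, 0)]
--     for candidate in others:
--         if len(result) >= max_urls:
--             break
--         result.append(candidate)
--     return result
-- ===== Notes on version B (the rewrite author's own statement) =====
-- stated objective: alternative
-- what changed: Replaces A's two capped rescans of linkup_urls (the second with an O(n) 'not in chosen' recheck per candidate) by one classifying pass that partitions candidates into preferred (duplicates kept) and seen-set-deduplicated others, breaking once preferred alone reaches the cap, followed by a merge: preferred truncated to max(max_urls,0) then others until the cap.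
import Mathlib
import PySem

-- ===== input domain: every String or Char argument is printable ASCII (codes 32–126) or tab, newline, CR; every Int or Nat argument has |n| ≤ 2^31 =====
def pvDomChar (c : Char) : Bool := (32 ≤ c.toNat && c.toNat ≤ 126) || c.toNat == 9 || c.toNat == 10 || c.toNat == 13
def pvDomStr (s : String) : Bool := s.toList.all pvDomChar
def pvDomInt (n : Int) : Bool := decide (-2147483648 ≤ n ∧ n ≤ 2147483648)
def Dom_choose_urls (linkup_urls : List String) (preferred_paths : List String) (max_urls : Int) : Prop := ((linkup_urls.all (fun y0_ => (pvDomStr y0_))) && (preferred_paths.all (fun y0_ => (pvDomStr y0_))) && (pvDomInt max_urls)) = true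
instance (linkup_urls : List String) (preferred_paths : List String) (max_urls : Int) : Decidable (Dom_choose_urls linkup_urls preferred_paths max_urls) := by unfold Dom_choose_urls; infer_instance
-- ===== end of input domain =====

-- B replaces A's two capped rescans of linkup_urls (the second with a linear 'not in chosen'
-- recheck) by one classifying pass (preferred / seen-set-deduplicated others) plus a merge;
-- objective: alternative decomposition of the same task.

-- ===== PORT A =====
-- any(path in candidate for path in preferred_paths)
def pvMatch (preferred_paths : List String) (candidate : String) : Bool :=
  preferred_paths.any (fun path => PySem.Str.isIn path candidate)

-- first loop of A: append preferred candidates until len(chosen) >= max_urls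
def pvLoopA1 (preferred_paths : List String) (max_urls : Int) : List String → List String → List String
  | [], chosen => chosen
  | c :: rest, chosen =>
    if (chosen.length : Int) ≥ max_urls then chosen
    else if pvMatch preferred_paths c then pvLoopA1 preferred_paths max_urls rest (chosen ++ [c])
    else pvLoopA1 preferred_paths max_urls rest chosen

-- second loop of A: append candidates not already in chosen until len(chosen) >= max_urls
def pvLoopA2 (max_urls : Int) : List String → List String → List String
  | [], chosen => chosen
  | c :: rest, chosen =>
    if (chosen.length : Int) ≥ max_urls then chosen
    else if c ∈ chosen then pvLoopA2 max_urls rest chosen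
    else pvLoopA2 max_urls rest (chosen ++ [c])

def choose_urls (linkup_urls : List String) (preferred_paths : List String) (max_urls : Int) : List String :=
  pvLoopA2 max_urls linkup_urls (pvLoopA1 preferred_paths max_urls linkup_urls [])

-- ===== PORT B =====
-- classifying pass of B: partition into preferred (dups kept) and others (deduped via the
-- seen set), stopping as soon as preferred alone reaches the cap
def pvClassify (preferred_paths : List String) (max_urls : Int) : List String → List String → List String → PySem.Set String → List String × List String
  | [], preferred, others, _ => (preferred, others)
  | c :: rest, preferred, others, seen =>
    if (preferred.length : Int) ≥ max_urls then (preferred, others)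
    else if pvMatch preferred_paths c then pvClassify preferred_paths max_urls rest (preferred ++ [c]) others seen
    else if PySem.Set.contains seen c then pvClassify preferred_paths max_urls rest preferred others seen
    else pvClassify preferred_paths max_urls rest preferred (others ++ [c]) (PySem.Set.add seen c)

-- merge loop of B: append others until len(result) >= max_urls
def pvMerge (max_urls : Int) : List String → List String → List String
  | [], result => result
  | c :: rest, result =>
    if (result.length : Int) ≥ max_urls then result
    else pvMerge max_urls rest (result ++ [c])

def choose_urls_alt (linkup_urls : List String) (preferred_paths : List String) (max_urls : Int) : List String :=
  let pr := pvClassify preferred_paths max_urls linkup_urls [] [] PySem.Set.empty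
  -- preferred[:max(max_urls, 0)] — the bound is ≥ 0, so the slice is exactly 'take'
  pvMerge max_urls pr.2 (pr.1.take (max max_urls 0).toNat)

-- ===== PRECONDITION & SPEC =====
def Spec_choose_urls (linkup_urls : List String) (preferred_paths : List String) (max_urls : Int) (out : List String) : Prop := out = choose_urls_alt linkup_urls preferred_paths max_urls
instance (linkup_urls : List String) (preferred_paths : List String) (max_urls : Int) (out : List String) : Decidable (Spec_choose_urls linkup_urls preferred_paths max_urls out) := by unfold Spec_choose_urls; infer_instance

-- ===== CLAIM (what is proved, stated in full; the proofs are below) =====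
def Claim_equal_choose_urls : Prop := ∀ (linkup_urls : List String) (preferred_paths : List String) (max_urls : Int), Dom_choose_urls linkup_urls preferred_paths max_urls → Spec_choose_urls linkup_urls preferred_paths max_urls (choose_urls linkup_urls preferred_paths max_urls)

-- ===== LEMMAS AND PROOFS =====

-- proof-only description of the 'others' stream B produces from a given seen set
def pvNew (preferred_paths : List String) : List String → PySem.Set String → List String
  | [], _ => []
  | c :: rest, seen =>
    if pvMatch preferred_paths c then pvNew preferred_paths rest seen
    else if PySem.Set.contains seen c then pvNew preferred_paths rest seen
    else c :: pvNew preferred_paths rest (PySem.Set.add seen c)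

theorem pvClassify_fst (pp : List String) (m : Int) (xs : List String) : ∀ (pref others : List String) (seen : PySem.Set String),
    (pvClassify pp m xs pref others seen).1 = pref ++ (xs.filter (pvMatch pp)).take (m - pref.length).toNat := by
  induction xs with
  | nil => intro pref others seen; simp [pvClassify]
  | cons c rest ih =>
    intro pref others seen
    by_cases hge : (pref.length : Int) ≥ m
    · have : (m - pref.length).toNat = 0 := by omega
      simp [pvClassify, hge, this]
    · have hk : (m - (pref.length : Int)).toNat = (m - pref.length - 1).toNat + 1 := by omega
      by_cases h : pvMatch pp c = true
      · rw [pvClassify, if_neg hge, if_pos h, ih, List.filter_cons_of_pos h, hk, List.take_succ_cons]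
        have harg : (m - ((pref ++ [c]).length : Int)).toNat = (m - (pref.length : Int) - 1).toNat := by
          simp; omega
        rw [harg]; simp
      · have hf : List.filter (pvMatch pp) (c :: rest) = List.filter (pvMatch pp) rest :=
          List.filter_cons_of_neg (by simpa using h)
        rw [pvClassify, if_neg hge, if_neg h, hf]
        split
        · rw [ih]
        · rw [ih]

theorem pvClassify_snd (pp : List String) (m : Int) (xs : List String) : ∀ (pref others : List String) (seen : PySem.Set String),
    ((pref.length : Int) + ((xs.filter (pvMatch pp)).length : Int) < m) →
    (pvClassify pp m xs pref others seen).2 = others ++ pvNew pp xs seen := by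
  induction xs with
  | nil => intro pref others seen _; simp [pvClassify, pvNew]
  | cons c rest ih =>
    intro pref others seen hlt
    have hge : ¬ (pref.length : Int) ≥ m := by
      have : (0 : Int) ≤ ((c :: rest).filter (pvMatch pp)).length := by positivity
      omega
    by_cases h : pvMatch pp c = true
    · have hf : ((c :: rest).filter (pvMatch pp)).length = (rest.filter (pvMatch pp)).length + 1 := by
        rw [List.filter_cons_of_pos h]; simp
      rw [pvClassify, if_neg hge, if_pos h, pvNew, if_pos h]
      refine ih (pref ++ [c]) others seen ?_
      rw [hf] at hlt; simp; omega
    · have hf : List.filter (pvMatch pp) (c :: rest) = List.filter (pvMatch pp) rest :=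
        List.filter_cons_of_neg (by simpa using h)
      rw [hf] at hlt
      rw [pvClassify, if_neg hge, if_neg h, pvNew, if_neg h]
      split
      · exact ih pref others seen hlt
      · rw [ih pref (others ++ [c]) (PySem.Set.add seen c) hlt]; simp

theorem pvLoopA1_spec (pp : List String) (m : Int) (xs : List String) : ∀ chosen : List String,
    pvLoopA1 pp m xs chosen = chosen ++ (xs.filter (pvMatch pp)).take (m - chosen.length).toNat := by
  induction xs with
  | nil => intro chosen; simp [pvLoopA1]
  | cons c rest ih =>
    intro chosen
    by_cases hge : (chosen.length : Int) ≥ m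
    · have : (m - chosen.length).toNat = 0 := by omega
      simp [pvLoopA1, hge, this]
    · have hk : (m - (chosen.length : Int)).toNat = (m - chosen.length - 1).toNat + 1 := by omega
      by_cases h : pvMatch pp c = true
      · rw [pvLoopA1, if_neg hge, if_pos h, ih, List.filter_cons_of_pos h, hk, List.take_succ_cons]
        have harg : (m - ((chosen ++ [c]).length : Int)).toNat = (m - (chosen.length : Int) - 1).toNat := by
          simp; omega
        rw [harg]; simp
      · simp only [pvLoopA1, if_neg hge, if_neg h, ih]
        simp [h]

theorem pvMerge_ge (m : Int) (l : List String) (chosen : List String) (h : (chosen.length : Int) ≥ m) :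
    pvMerge m l chosen = chosen := by
  cases l with
  | nil => rfl
  | cons c rest => simp [pvMerge, h]

theorem pvLoopA2_ge (m : Int) (l : List String) (chosen : List String) (h : (chosen.length : Int) ≥ m) :
    pvLoopA2 m l chosen = chosen := by
  cases l with
  | nil => rfl
  | cons c rest => simp [pvLoopA2, h]

-- simulation: A's second loop equals B's merge over the deduped non-matching stream
theorem pvLoopA2_eq_merge (pp : List String) (m : Int) (xs : List String) :
    ∀ (chosen : List String) (seen : PySem.Set String),
    (∀ y ∈ xs, pvMatch pp y = true → y ∈ chosen) →
    (∀ y, pvMatch pp y = false → (y ∈ chosen ↔ y ∈ seen)) →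
    pvLoopA2 m xs chosen = pvMerge m (pvNew pp xs seen) chosen := by
  induction xs with
  | nil => intro chosen seen _ _; simp [pvLoopA2, pvNew, pvMerge]
  | cons c rest ih =>
    intro chosen seen h1 h2
    by_cases hge : (chosen.length : Int) ≥ m
    · rw [pvLoopA2, if_pos hge, pvMerge_ge m _ _ hge]
    · by_cases h : pvMatch pp c = true
      · have hc : c ∈ chosen := h1 c (List.mem_cons_self) h
        rw [pvLoopA2, if_neg hge, if_pos hc, pvNew, if_pos h]
        exact ih chosen seen (fun y hy => h1 y (List.mem_cons_of_mem _ hy)) h2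
      · have h' : pvMatch pp c = false := by simpa using h
        by_cases hs : PySem.Set.contains seen c = true
        · have hcseen : c ∈ seen := (PySem.Set.contains_iff seen c).mp hs
          have hc : c ∈ chosen := (h2 c h').mpr hcseen
          rw [pvLoopA2, if_neg hge, if_pos hc, pvNew, if_neg h, if_pos hs]
          exact ih chosen seen (fun y hy => h1 y (List.mem_cons_of_mem _ hy)) h2
        · have hcseen : c ∉ seen := fun hmem => hs ((PySem.Set.contains_iff seen c).mpr hmem)
          have hc : c ∉ chosen := fun hmem => hcseen ((h2 c h').mp hmem)
          rw [pvLoopA2, if_neg hge, if_neg hc, pvNew, if_neg h, if_neg hs]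
          rw [pvMerge, if_neg hge]
          refine ih (chosen ++ [c]) (PySem.Set.add seen c) ?_ ?_
          · intro y hy hm
            exact List.mem_append_left _ (h1 y (List.mem_cons_of_mem _ hy) hm)
          · intro y hy
            rw [List.mem_append, List.mem_singleton, PySem.Set.mem_add, h2 y hy]

-- ===== VERDICT (by name: the statement is the Claim_ definition above) =====
theorem choose_urls_spec : Claim_equal_choose_urls := by
  intro xs pp m _
  unfold Spec_choose_urls choose_urls choose_urls_alt
  simp only []
  have hmax : (max m 0).toNat = m.toNat := by omega
  have h1 : pvLoopA1 pp m xs [] = (xs.filter (pvMatch pp)).take m.toNat := by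
    rw [pvLoopA1_spec]; simp
  have hB1 : (pvClassify pp m xs [] [] PySem.Set.empty).1 = (xs.filter (pvMatch pp)).take m.toNat := by
    rw [pvClassify_fst]; simp
  rw [h1, hB1, hmax]
  set chosen0 := (xs.filter (pvMatch pp)).take m.toNat with hch
  have htt : chosen0.take m.toNat = chosen0 := by
    rw [hch, List.take_take, min_self]
  rw [htt]
  by_cases hge : (chosen0.length : Int) ≥ m
  · rw [pvLoopA2_ge m _ _ hge, pvMerge_ge m _ _ hge]
  · have hlen : chosen0.length = min m.toNat (xs.filter (pvMatch pp)).length := by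
      simp [hch]
    have hflt : ((xs.filter (pvMatch pp)).length : Int) < m := by omega
    have hB2 : (pvClassify pp m xs [] [] PySem.Set.empty).2 = pvNew pp xs PySem.Set.empty := by
      rw [pvClassify_snd pp m xs [] [] PySem.Set.empty (by simpa using hflt)]; simp
    have hfull : chosen0 = xs.filter (pvMatch pp) := by
      have : (xs.filter (pvMatch pp)).length ≤ m.toNat := by omega
      simp [hch, List.take_of_length_le this]
    rw [hB2, hfull]
    refine pvLoopA2_eq_merge pp m xs _ PySem.Set.empty ?_ ?_
    · intro y hy hm; exact List.mem_filter.mpr ⟨hy, hm⟩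
    · intro y hy
      constructor
      · intro hmem
        have := (List.mem_filter.mp hmem).2
        rw [hy] at this; cases this
      · intro hmem; cases hmem
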